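-- pv_equiv track=rewrite | github.com/selvachandrasekaranselvaraj/AtomicAI | AtomicAI/predictor/split2b3b.py | set_splitG3b
-- ===== SOURCE A (Python) =====
-- def set_splitG3b(Param_dict):
--     """
--         Generate list of parameters.
--         # TODO: More details to be added to documentation.
--     :param Param_dict:
--     :return: G3b_lst_param_eta
--     """
--     G3b_lst = Param_dict.get('G3b_lst')
--     G3b_eta = Param_dict.get('G3b_eta')
--     nG3b_eta = len(G3b_eta)
--
--     G3b_lst_param_eta = [[] for _ in range(len(G3b_lst))]
--
--     for etID1 in range(nG3b_eta):
--         for etID2 in range(etID1 + 1):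
--             for etID3 in range(etID2 + 1):
--                 G3b_lst_param_eta[0].append([etID1, etID2, etID3])
--
--     for etID1 in range(nG3b_eta):
--         for etID2 in range(nG3b_eta):
--             for etID3 in range(etID2 + 1):
--                 G3b_lst_param_eta[1].append([etID1, etID2, etID3])
--
--     for etID1 in range(nG3b_eta):
--         for etID2 in range(etID1 + 1):
--             for etID3 in range(nG3b_eta):
--                 G3b_lst_param_eta[2].append([etID1, etID2, etID3])
--
--     return G3b_lst_param_eta
-- ===== SOURCE B (Python) =====
-- def set_splitG3b(Param_dict):
--     """Single triple-nested pass over the full eta cube, filtering each triple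
--     into the three pattern lists, instead of three tailored loop nests."""
--     G3b_lst = Param_dict.get('G3b_lst')
--     G3b_eta = Param_dict.get('G3b_eta')
--     n = len(G3b_eta)
--     out = [[] for _ in range(len(G3b_lst))]
--     for i in range(n):
--         for j in range(n):
--             for k in range(n):
--                 t = [i, j, k]
--                 if i >= j >= k:
--                     out[0].append(t)
--                 if j >= k:
--                     out[1].append(t)
--                 if i >= j:
--                     out[2].append(t)
--     return out
-- ===== Notes on version B (the rewrite author's own statement) =====
-- stated objective: alternative
-- what changed: Replaces A's three tailored loop nests (each with its own range bounds) by one pass over the full eta cube that filters every triple into the three pattern lists with comparison tests.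
import Mathlib
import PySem

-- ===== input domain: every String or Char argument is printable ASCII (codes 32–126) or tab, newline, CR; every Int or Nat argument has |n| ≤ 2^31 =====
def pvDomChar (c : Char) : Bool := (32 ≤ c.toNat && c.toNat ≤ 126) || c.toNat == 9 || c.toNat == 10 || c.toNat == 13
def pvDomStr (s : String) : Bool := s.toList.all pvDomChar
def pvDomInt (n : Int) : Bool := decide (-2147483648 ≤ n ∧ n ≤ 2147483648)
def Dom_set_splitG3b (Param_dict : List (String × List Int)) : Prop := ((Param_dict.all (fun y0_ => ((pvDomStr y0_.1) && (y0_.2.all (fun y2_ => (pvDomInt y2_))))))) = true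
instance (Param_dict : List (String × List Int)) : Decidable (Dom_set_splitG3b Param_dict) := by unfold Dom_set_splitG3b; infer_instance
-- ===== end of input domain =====

-- B replaces A's three tailored loop nests by one pass over the full eta cube that filters
-- each triple into the three pattern lists (objective: alternative, same cost).

-- ===== PORT A =====
-- Three sequential triple loops, each appending into one row of the result list.
def set_splitG3b (Param_dict : List (String × List Int)) : List (List (List Int)) :=
  match PySem.Dict.get? (PySem.Dict.mk Param_dict) "G3b_lst", PySem.Dict.get? (PySem.Dict.mk Param_dict) "G3b_eta" with
  | some G3b_lst, some G3b_eta =>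
    let nG3b_eta := G3b_eta.length
    let rows0 : List (List (List Int)) := List.replicate G3b_lst.length []
    let rows1 := (List.range nG3b_eta).foldl (fun r (et1 : Nat) =>
      (List.range (et1+1)).foldl (fun r (et2 : Nat) =>
        (List.range (et2+1)).foldl (fun r (et3 : Nat) =>
          r.modify 0 (· ++ [[(et1 : Int), (et2 : Int), (et3 : Int)]])) r) r) rows0
    let rows2 := (List.range nG3b_eta).foldl (fun r (et1 : Nat) =>
      (List.range nG3b_eta).foldl (fun r (et2 : Nat) =>
        (List.range (et2+1)).foldl (fun r (et3 : Nat) =>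
          r.modify 1 (· ++ [[(et1 : Int), (et2 : Int), (et3 : Int)]])) r) r) rows1
    (List.range nG3b_eta).foldl (fun r (et1 : Nat) =>
      (List.range (et1+1)).foldl (fun r (et2 : Nat) =>
        (List.range nG3b_eta).foldl (fun r (et3 : Nat) =>
          r.modify 2 (· ++ [[(et1 : Int), (et2 : Int), (et3 : Int)]])) r) r) rows2
  | _, _ => []

-- ===== PORT B =====
-- One pass over the full cube; each triple is filtered into rows 0/1/2 by comparison tests.
def set_splitG3b_alt (Param_dict : List (String × List Int)) : List (List (List Int)) :=
  match PySem.Dict.get? (PySem.Dict.mk Param_dict) "G3b_lst" with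
  | none => []
  | some G3b_lst =>
    match PySem.Dict.get? (PySem.Dict.mk Param_dict) "G3b_eta" with
    | none => []
    | some G3b_eta =>
    let n := G3b_eta.length
    (List.range n).foldl (fun r (i : Nat) =>
      (List.range n).foldl (fun r (j : Nat) =>
        (List.range n).foldl (fun r (k : Nat) =>
          let t : List Int := [(i : Int), (j : Int), (k : Int)]
          let r := if j ≤ i ∧ k ≤ j then r.modify 0 (· ++ [t]) else r
          let r := if k ≤ j then r.modify 1 (· ++ [t]) else r
          if j ≤ i then r.modify 2 (· ++ [t]) else r) r) r)
      (List.replicate G3b_lst.length [])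

-- ===== PRECONDITION & SPEC =====
-- Pre_ excludes inputs where the Python A raises: a missing 'G3b_lst' or 'G3b_eta' key
-- (TypeError on len(None)) and fewer than 3 entries in G3b_lst with a nonempty G3b_eta
-- (IndexError on the appends); B raises there too.
def Pre_set_splitG3b (Param_dict : List (String × List Int)) : Prop :=
  (PySem.Dict.get? (PySem.Dict.mk Param_dict) "G3b_lst").isSome = true ∧
  (PySem.Dict.get? (PySem.Dict.mk Param_dict) "G3b_eta").isSome = true ∧
  ((PySem.Dict.get? (PySem.Dict.mk Param_dict) "G3b_eta").getD [] = [] ∨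
    3 ≤ ((PySem.Dict.get? (PySem.Dict.mk Param_dict) "G3b_lst").getD []).length)
instance (Param_dict : List (String × List Int)) : Decidable (Pre_set_splitG3b Param_dict) := by
  unfold Pre_set_splitG3b; infer_instance

def pvWitness_set_splitG3b : (List (String × List Int)) :=
  [("G3b_lst", [0, 1, 2]), ("G3b_eta", [4, 7])]

def Spec_set_splitG3b (Param_dict : List (String × List Int)) (out : List (List (List Int))) : Prop := out = set_splitG3b_alt Param_dict
instance (Param_dict : List (String × List Int)) (out : List (List (List Int))) : Decidable (Spec_set_splitG3b Param_dict out) := by unfold Spec_set_splitG3b; infer_instance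

-- ===== CLAIM (what is proved, stated in full; the proofs are below) =====
def Claim_equal_set_splitG3b : Prop := ∀ (Param_dict : List (String × List Int)), Dom_set_splitG3b Param_dict → Pre_set_splitG3b Param_dict → Spec_set_splitG3b Param_dict (set_splitG3b Param_dict)

-- ===== LEMMAS AND PROOFS =====

lemma pv_modify_comm {α : Type} (f g : α → α) (i j : Nat) (h : i ≠ j) (l : List α) :
    (l.modify i f).modify j g = (l.modify j g).modify i f := by
  induction l generalizing i j with
  | nil => simp
  | cons a t ih =>
    cases i <;> cases j <;> simp_all [List.modify]

lemma pv_swap10 {α : Type} (f g : α → α) (l : List α) :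
    (l.modify 1 f).modify 0 g = (l.modify 0 g).modify 1 f := pv_modify_comm f g 1 0 (by omega) l
lemma pv_swap20 {α : Type} (f g : α → α) (l : List α) :
    (l.modify 2 f).modify 0 g = (l.modify 0 g).modify 2 f := pv_modify_comm f g 2 0 (by omega) l
lemma pv_swap21 {α : Type} (f g : α → α) (l : List α) :
    (l.modify 2 f).modify 1 g = (l.modify 1 g).modify 2 f := pv_modify_comm f g 2 1 (by omega) l

-- one loop nest of A, appending into row i, is a single modify with the flattened list
lemma pv_foldl_modify {α β : Type} (i : Nat) (g : α → List β) (xs : List α) (r : List (List β)) :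
    xs.foldl (fun r x => r.modify i (· ++ g x)) r = r.modify i (· ++ xs.flatMap g) := by
  induction xs generalizing r with
  | nil => simp; exact (List.modify_id i r).symm
  | cons x t ih =>
    rw [List.foldl_cons, ih, List.modify_modify_eq]
    congr 1
    funext l; simp

-- B's combined loop, modifying rows 0, 1 and 2 per element, splits into three modifies
lemma pv_foldl_modify3 {α β : Type} (c0 c1 c2 : α → List β) (xs : List α) (r : List (List β)) :
    xs.foldl (fun r x => ((r.modify 0 (· ++ c0 x)).modify 1 (· ++ c1 x)).modify 2 (· ++ c2 x)) r
      = ((r.modify 0 (· ++ xs.flatMap c0)).modify 1 (· ++ xs.flatMap c1)).modify 2 (· ++ xs.flatMap c2) := by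
  induction xs generalizing r with
  | nil =>
    simp
    rw [show (fun (x : List β) => x) = id from rfl, List.modify_id, List.modify_id, List.modify_id]
  | cons x t ih =>
    rw [List.foldl_cons, ih]
    simp [pv_swap10, pv_swap20, pv_swap21, List.modify_modify_eq, Function.comp_def,
          List.append_assoc]

lemma pv_if_modify {β : Type} (c : Prop) [Decidable c] (i : Nat) (t : β) (r : List (List β)) :
    (if c then r.modify i (· ++ [t]) else r) = r.modify i (· ++ (if c then [t] else [])) := by
  split_ifs
  · rfl
  · rw [show (fun x => x ++ ([] : List β)) = id from by funext x; simp, List.modify_id]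

-- a range filtered by 'k ≤ c' is the shorter range
lemma pv_flatMap_range_if {β : Type} (c m : Nat) (g : Nat → List β) (h : c < m) :
    (List.range m).flatMap (fun k => if k ≤ c then g k else []) = (List.range (c+1)).flatMap g := by
  obtain ⟨d, rfl⟩ : ∃ d, m = (c+1)+d := ⟨m - (c+1), by omega⟩
  rw [List.range_add, List.flatMap_append]
  have h1 : (List.range (c+1)).flatMap (fun k => if k ≤ c then g k else []) =
      (List.range (c+1)).flatMap g := by
    refine List.flatMap_congr (fun k hk => ?_)
    rw [List.mem_range] at hk
    rw [if_pos (by omega)]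
  have h2 : ((List.range d).map (c+1+·)).flatMap (fun k => if k ≤ c then g k else []) = [] := by
    rw [List.flatMap_eq_nil_iff]
    intro k hk
    simp only [List.mem_map, List.mem_range] at hk
    obtain ⟨y, _, rfl⟩ := hk
    rw [if_neg (by omega)]
  rw [h1, h2, List.append_nil]

lemma pv_T0 {β : Type} (n : Nat) (f : Nat → Nat → Nat → β) :
    (List.range n).flatMap (fun i => (List.range n).flatMap fun j => (List.range n).flatMap fun k => if j ≤ i ∧ k ≤ j then [f i j k] else [])
      = (List.range n).flatMap (fun i => (List.range (i+1)).flatMap fun j => (List.range (j+1)).flatMap fun k => [f i j k]) := by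
  refine List.flatMap_congr (fun i hi => ?_)
  rw [List.mem_range] at hi
  have h1 : ∀ j ∈ List.range n,
      (List.range n).flatMap (fun k => if j ≤ i ∧ k ≤ j then [f i j k] else [])
        = if j ≤ i then (List.range (j+1)).flatMap (fun k => [f i j k]) else [] := by
    intro j hj
    rw [List.mem_range] at hj
    by_cases hji : j ≤ i
    · simp only [hji, true_and]
      exact pv_flatMap_range_if j n _ hj
    · simp [hji]
  rw [List.flatMap_congr h1, pv_flatMap_range_if i n _ hi]

lemma pv_T1 {β : Type} (n : Nat) (f : Nat → Nat → Nat → β) :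
    (List.range n).flatMap (fun i => (List.range n).flatMap fun j => (List.range n).flatMap fun k => if k ≤ j then [f i j k] else [])
      = (List.range n).flatMap (fun i => (List.range n).flatMap fun j => (List.range (j+1)).flatMap fun k => [f i j k]) := by
  refine List.flatMap_congr (fun i _ => ?_)
  refine List.flatMap_congr (fun j hj => ?_)
  rw [List.mem_range] at hj
  exact pv_flatMap_range_if j n _ hj

lemma pv_T2 {β : Type} (n : Nat) (f : Nat → Nat → Nat → β) :
    (List.range n).flatMap (fun i => (List.range n).flatMap fun j => (List.range n).flatMap fun k => if j ≤ i then [f i j k] else [])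
      = (List.range n).flatMap (fun i => (List.range (i+1)).flatMap fun j => (List.range n).flatMap fun k => [f i j k]) := by
  refine List.flatMap_congr (fun i hi => ?_)
  rw [List.mem_range] at hi
  have h1 : ∀ j ∈ List.range n,
      (List.range n).flatMap (fun k => if j ≤ i then [f i j k] else [])
        = if j ≤ i then (List.range n).flatMap (fun k => [f i j k]) else [] := by
    intro j _
    by_cases hji : j ≤ i <;> simp [hji]
  rw [List.flatMap_congr h1, pv_flatMap_range_if i n _ hi]

-- ===== VERDICT (by name: the statement is the Claim_ definition above) =====
theorem set_splitG3b_spec : Claim_equal_set_splitG3b := by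
  intro Param_dict _ _
  unfold Spec_set_splitG3b set_splitG3b set_splitG3b_alt
  cases hl : PySem.Dict.get? (PySem.Dict.mk Param_dict) "G3b_lst" with
  | none => rfl
  | some G3b_lst =>
    cases he : PySem.Dict.get? (PySem.Dict.mk Param_dict) "G3b_eta" with
    | none => rfl
    | some G3b_eta =>
      simp only [pv_if_modify, pv_foldl_modify, pv_foldl_modify3]
      rw [pv_T0 G3b_eta.length (fun i j k => ([(i : Int), (j : Int), (k : Int)] : List Int)),
          pv_T1 G3b_eta.length (fun i j k => ([(i : Int), (j : Int), (k : Int)] : List Int)),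
          pv_T2 G3b_eta.length (fun i j k => ([(i : Int), (j : Int), (k : Int)] : List Int))]
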